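-- pv_equiv track=rewrite | github.com/DanFlannel/PythonLearning | summerOf69.py | summation2Exclusive
-- ===== SOURCE A (Python) =====
-- def summation2Exclusive(arr):
--     if(len(arr) == 0): return 0
--     total = 0
--     canAdd = True
--     for x in arr:
--         tmp = canAdd #make sure we do not include the 9 as we switch back to being able to add
--         canAdd = getCanAdd(canAdd, x)
--         if(tmp and canAdd) : total = total + x
--     return total
--
-- def getCanAdd(b, x):
--     if(x == 6):
--         return False
--     elif(x == 9 and b == False):
--         return True
--     else:
--         return b
-- ===== SOURCE B (Python) =====
-- def summation2Exclusive(arr):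
--     total = 0
--     i = 0
--     n = len(arr)
--     while i < n:
--         if arr[i] == 6:
--             i += 1
--             while i < n and arr[i] != 9:
--                 i += 1
--             i += 1  # consume the terminating 9 (harmless at end)
--         else:
--             total += arr[i]
--             i += 1
--     return total
-- ===== Notes on version B (the rewrite author's own statement) =====
-- stated objective: simpler
-- what changed: Replaced the boolean state-machine fold (canAdd flag threaded through every element) with an index while-loop that, on seeing a 6, runs an inner skip loop past the matching 9; only elements outside 6..9 blocks are ever touched by the adder.
import Mathlib
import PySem

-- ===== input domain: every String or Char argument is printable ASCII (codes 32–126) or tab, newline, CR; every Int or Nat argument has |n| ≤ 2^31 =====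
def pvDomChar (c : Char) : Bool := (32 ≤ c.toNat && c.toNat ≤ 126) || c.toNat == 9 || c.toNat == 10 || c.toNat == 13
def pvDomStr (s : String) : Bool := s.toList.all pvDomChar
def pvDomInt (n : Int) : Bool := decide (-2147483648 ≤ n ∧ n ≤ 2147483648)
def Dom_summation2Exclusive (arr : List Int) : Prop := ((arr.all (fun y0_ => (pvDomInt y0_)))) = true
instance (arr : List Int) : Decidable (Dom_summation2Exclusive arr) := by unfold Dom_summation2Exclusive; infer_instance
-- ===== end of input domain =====

-- B replaces A's boolean state-machine fold with a skip-the-6..9-block scan; objective: simpler.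


-- ===== PORT A =====
def getCanAdd (b : Bool) (x : Int) : Bool :=
  if x = 6 then false
  else if x = 9 ∧ b = false then true
  else b

def summation2Exclusive (arr : List Int) : Int :=
  if arr.length = 0 then 0
  else
    (arr.foldl (fun (s : Int × Bool) x =>
      let tmp := s.2
      let canAdd := getCanAdd s.2 x
      (if tmp && canAdd then s.1 + x else s.1, canAdd)) (0, true)).1

-- ===== PORT B =====
-- inner `while i<n and arr[i]!=9: i+=1` followed by `i+=1`: drop up to and including the first 9
def skipTo9 : List Int → List Int
  | [] => []
  | y :: ys => if y = 9 then ys else skipTo9 ys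

theorem skipTo9_length_le : ∀ (xs : List Int), (skipTo9 xs).length ≤ xs.length := by
  intro xs
  induction xs with
  | nil => simp [skipTo9]
  | cons y ys ih =>
    simp only [skipTo9]
    split
    · simp
    · exact Nat.le_succ_of_le ih

-- outer while-loop, expressed on the remaining suffix of arr
def sumSkip : List Int → Int
  | [] => 0
  | x :: xs =>
    if x = 6 then sumSkip (skipTo9 xs)
    else x + sumSkip xs
termination_by xs => xs.length
decreasing_by
  · exact Nat.lt_succ_of_le (skipTo9_length_le xs)
  · simp

def summation2Exclusive_alt (arr : List Int) : Int := sumSkip arr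

-- ===== PRECONDITION & SPEC =====
def Spec_summation2Exclusive (arr : List Int) (out : Int) : Prop := out = summation2Exclusive_alt arr
instance (arr : List Int) (out : Int) : Decidable (Spec_summation2Exclusive arr out) := by unfold Spec_summation2Exclusive; infer_instance

-- ===== CLAIM (what is proved, stated in full; the proofs are below) =====
def Claim_equal_summation2Exclusive : Prop := ∀ (arr : List Int), Dom_summation2Exclusive arr → Spec_summation2Exclusive arr (summation2Exclusive arr)

-- ===== LEMMAS AND PROOFS =====

-- the step function of A's fold, named for the proofs
def stepA (s : Int × Bool) (x : Int) : Int × Bool :=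
  let tmp := s.2
  let canAdd := getCanAdd s.2 x
  (if tmp && canAdd then s.1 + x else s.1, canAdd)

theorem stepA_true (t x : Int) (hx : x ≠ 6) : stepA (t, true) x = (t + x, true) := by
  simp [stepA, getCanAdd, hx]

theorem stepA_true6 (t : Int) : stepA (t, true) 6 = (t, false) := by
  simp [stepA, getCanAdd]

theorem stepA_false9 (t : Int) : stepA (t, false) 9 = (t, true) := by
  simp [stepA, getCanAdd]

theorem stepA_false (t x : Int) (h9 : x ≠ 9) : stepA (t, false) x = (t, false) := by
  simp [stepA, getCanAdd, h9]

theorem foldA_invariant : ∀ (xs : List Int) (t : Int),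
    (xs.foldl stepA (t, true)).1 = t + sumSkip xs ∧
    (xs.foldl stepA (t, false)).1 = t + sumSkip (skipTo9 xs) := by
  intro xs
  induction xs with
  | nil => intro t; simp [sumSkip, skipTo9]
  | cons x xs ih =>
    intro t
    constructor
    · by_cases hx : x = 6
      · subst hx
        rw [List.foldl_cons, stepA_true6, sumSkip]
        simpa using (ih t).2
      · have hs : sumSkip (x :: xs) = x + sumSkip xs := by rw [sumSkip]; simp [hx]
        rw [List.foldl_cons, stepA_true t x hx, hs]
        exact ((ih (t + x)).1).trans (by ring)
    · by_cases h9 : x = 9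
      · subst h9
        rw [List.foldl_cons, stepA_false9, skipTo9]
        simpa using (ih t).1
      · have hk : skipTo9 (x :: xs) = skipTo9 xs := by rw [skipTo9]; simp [h9]
        rw [List.foldl_cons, stepA_false t x h9, hk]
        exact (ih t).2

-- ===== VERDICT (by name: the statement is the Claim_ definition above) =====
theorem summation2Exclusive_spec : Claim_equal_summation2Exclusive := by
  intro arr _
  unfold Spec_summation2Exclusive summation2Exclusive summation2Exclusive_alt
  by_cases h : arr.length = 0
  · have : arr = [] := List.length_eq_zero_iff.mp h
    simp [this, sumSkip]
  · simp only [if_neg h]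
    have h1 : (arr.foldl stepA (0, true)).1 = 0 + sumSkip arr := (foldA_invariant arr 0).1
    rw [zero_add] at h1
    exact h1
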